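-- pv_equiv track=rewrite | github.com/ShahnavajS/Coding-Agent | production-coding-assistant/backend/assistant_backend/core/planner.py | _render_tree
-- ===== SOURCE A (Python) =====
-- def _render_tree(paths: list[str]) -> str:
--     if not paths:
--         return "(no new files planned)"
--
--     tree: dict[str, dict] = {}
--     for path in paths:
--         node = tree
--         parts = [part for part in path.split("/") if part]
--         for part in parts[:-1]:
--             node = node.setdefault(part, {})
--         node[parts[-1]] = {}
--
--     lines: list[str] = ["project/"]
--
--     def walk(node: dict[str, dict], prefix: str = "") -> None:
--         keys = sorted(node.keys())
--         for index, key in enumerate(keys):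
--             connector = "`-- " if index == len(keys) - 1 else "|-- "
--             lines.append(f"{prefix}{connector}{key}")
--             child = node[key]
--             if child:
--                 extension = "    " if index == len(keys) - 1 else "|   "
--                 walk(child, prefix + extension)
--
--     walk(tree)
--     return "\n".join(lines)
-- ===== SOURCE B (Python) =====
-- def _render_tree(paths: list[str]) -> str:
--     if not paths:
--         return "(no new files planned)"
--
--     tree: dict[str, dict] = {}
--     for path in paths:
--         node = tree
--         parts = [part for part in path.split("/") if part]
--         for part in parts[:-1]:
--             node = node.setdefault(part, {})
--         node[parts[-1]] = {}
--
--     lines: list[str] = ["project/"]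
--     stack: list[tuple[str, str, dict, bool]] = []
--
--     def push_children(node: dict[str, dict], prefix: str) -> None:
--         entries = sorted(node.items(), key=lambda kv: kv[0])
--         for position, (key, child) in enumerate(reversed(entries)):
--             stack.append((prefix, key, child, position == 0))
--
--     push_children(tree, "")
--     while stack:
--         prefix, key, child, is_last = stack.pop()
--         lines.append(prefix + ("`-- " if is_last else "|-- ") + key)
--         if child:
--             push_children(child, prefix + ("    " if is_last else "|   "))
--     return "\n".join(lines)
-- ===== Notes on version B (the rewrite author's own statement) =====
-- stated objective: alternative
-- what changed: The recursive walk is replaced by an explicit-stack iterative DFS (one while loop threading prefix/key/child/is_last through stack items), and each node's items are sorted once instead of sorting the keys and looking each one up; the trie-building pass is kept.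
import Mathlib
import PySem

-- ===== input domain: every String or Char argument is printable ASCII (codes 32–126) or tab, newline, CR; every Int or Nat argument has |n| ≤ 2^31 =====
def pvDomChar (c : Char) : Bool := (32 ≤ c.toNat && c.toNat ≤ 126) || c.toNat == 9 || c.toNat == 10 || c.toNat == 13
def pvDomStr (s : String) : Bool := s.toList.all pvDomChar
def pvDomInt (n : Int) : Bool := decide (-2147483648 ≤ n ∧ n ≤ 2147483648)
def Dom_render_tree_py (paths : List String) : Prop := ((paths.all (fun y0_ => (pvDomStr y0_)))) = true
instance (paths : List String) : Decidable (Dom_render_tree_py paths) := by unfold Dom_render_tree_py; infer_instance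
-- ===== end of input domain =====

-- B replaces A's recursive walk by an explicit-stack iterative DFS (and sorts each node's
-- items once instead of sorting the keys and looking each one up); the trie-building pass
-- is kept. Both Pythons mutate only local state; the equivalence is about the return value.

-- Shared trie structure: Python's nested dict[str, dict] (insertion-ordered association
-- lists, encoded as a mutual inductive because nested inductives are not allowed).
mutual
inductive Trie : Type where
  | node : TrieL → Trie
inductive TrieL : Type where
  | nil : TrieL
  | cons : String → Trie → TrieL → TrieL
end

def Trie.entries : Trie → TrieL
  | .node l => l

mutual
def sizeT : Trie → Nat
  | .node l => sizeL l + 1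
def sizeL : TrieL → Nat
  | .nil => 0
  | .cons _ c r => sizeT c + sizeL r
end

theorem sizeT_pos : ∀ (c : Trie), 1 ≤ sizeT c
  | .node l => by simp [sizeT]

def TrieL.toList : TrieL → List (String × Trie)
  | .nil => []
  | .cons k c r => (k, c) :: TrieL.toList r

-- node.keys()
def keysOf : TrieL → List String
  | .nil => []
  | .cons k _ r => k :: keysOf r

-- node[key] (first match; total because the walk only descends into non-empty children,
-- and a missing key yields the empty node)
def getT : TrieL → String → Trie
  | .nil, _ => .node .nil
  | .cons k' c r, k => if k' == k then c else getT r k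

-- truth value of a dict: `if child:`
def isEmptyT : Trie → Bool
  | .node .nil => true
  | .node (.cons _ _ _) => false

-- node[key] = {}  (overwrite keeps position, new keys append — dict semantics)
def setItem : TrieL → String → TrieL
  | .nil, k => .cons k (.node .nil) .nil
  | .cons k' c r, k => if k' == k then .cons k' (.node .nil) r else .cons k' c (setItem r k)

-- the inner `for part in parts[:-1]: node = node.setdefault(part, {})` + final overwrite,
-- as a recursion along the parts (simulating the in-place mutation of the nested dicts)
mutual
def insertPath : TrieL → List String → TrieL
  | t, [] => t            -- unreachable inside Pre_ (A raises IndexError on empty parts)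
  | t, [k] => setItem t k
  | t, k :: rest => insertGo t k rest
  termination_by _t parts => (parts.length, 0)
  decreasing_by exact Prod.Lex.left _ _ (by simp [List.length_cons])
def insertGo : TrieL → String → List String → TrieL
  | .nil, k, rest => .cons k (.node (insertPath .nil rest)) .nil
  | .cons k' c r, k, rest =>
      if k' == k then .cons k' (.node (insertPath c.entries rest)) r
      else .cons k' c (insertGo r k rest)
  termination_by t _ rest => (rest.length, sizeL t + 1)
  decreasing_by
  · exact Prod.Lex.right _ (by omega)
  · exact Prod.Lex.right _ (by omega)
  · exact Prod.Lex.right _ (by cases c with | node l => simp [sizeL, sizeT])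
end

-- path.split("/") with the nonempty separator "/" is exactly Chars.splitOn;
-- [part for part in … if part]
def partsOf (path : String) : List String :=
  ((PySem.Chars.splitOn path.toList "/".toList).map String.ofList).filter (fun s => !(s == ""))

def buildTrie (paths : List String) : TrieL :=
  paths.foldl (fun t p => insertPath t (partsOf p)) .nil

-- ===== PORT A =====
-- A's recursive walk: sorted(node.keys()), `index == len(keys) - 1` (equivalently: the
-- rest of the key list is empty) choosing the connector.
theorem sizeL_getT_lt : ∀ (t : TrieL) (k : String), isEmptyT (getT t k) = false →
    sizeL (getT t k).entries < sizeL t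
  | .nil, k, h => by simp [getT, isEmptyT] at h
  | .cons k' c r, k, h => by
    simp only [getT] at h ⊢
    by_cases hk : (k' == k) = true
    · simp only [hk, if_pos] at h ⊢
      cases c with | node l => simp [Trie.entries, sizeL, sizeT]; omega
    · simp only [hk] at h ⊢
      have := sizeL_getT_lt r k h
      have := sizeT_pos c
      simp [sizeL]; omega

mutual
def walkT (t : TrieL) (pre : String) : List String :=
  walkKeys t (PySem.List.sorted (keysOf t) (fun k => k) false) pre
  termination_by (sizeL t, 1, 0)
  decreasing_by exact Prod.Lex.right _ (Prod.Lex.left _ _ (by omega))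
def walkKeys (t : TrieL) (ks : List String) (pre : String) : List String :=
  match ks with
  | [] => []
  | k :: rest =>
    let child := getT t k
    (pre ++ (if rest.isEmpty then "`-- " else "|-- ") ++ k) ::
      ((if isEmptyT child then [] else
          walkT child.entries (pre ++ (if rest.isEmpty then "    " else "|   "))) ++
        walkKeys t rest pre)
  termination_by (sizeL t, 0, ks.length)
  decreasing_by
  · rename_i hch
    refine Prod.Lex.left _ _ ?_
    have h : isEmptyT (getT t k) = false := by simpa using hch
    have := sizeL_getT_lt t k h
    omega
  · exact Prod.Lex.right _ (Prod.Lex.right _ (by simp only [List.length_cons]; omega))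
end

def render_tree_py (paths : List String) : String :=
  if paths.isEmpty then "(no new files planned)"
  else PySem.Str.join "\n" ("project/" :: walkT (buildTrie paths) "")

-- ===== PORT B =====
-- sorted(node.items(), key=lambda kv: kv[0]), pushed reversed so that the pop order is
-- the sorted order: the resulting top-of-stack segment is the entries in order with
-- is_last on the final one. List head = Python stack top.
def sortedEntries (t : TrieL) : List (String × Trie) :=
  PySem.List.sorted t.toList (fun kv => kv.1) false

def annGo (pre : String) : List (String × Trie) → List (String × String × Trie × Bool)
  | [] => []
  | (k, c) :: rest => (pre, k, c, rest.isEmpty) :: annGo pre rest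

-- size bookkeeping for the termination of the stack loop
theorem sum_toList_sizes : ∀ (t : TrieL),
    (t.toList.map (fun kv => sizeT kv.2)).sum = sizeL t
  | .nil => by rfl
  | .cons k c r => by simp [TrieL.toList, sizeL, sum_toList_sizes r]

theorem sumAnn (pre : String) (es : List (String × Trie)) :
    (List.map (fun it => sizeT it.2.2.1) (annGo pre es)).sum =
      (es.map (fun kv => sizeT kv.2)).sum := by
  induction es with
  | nil => rfl
  | cons kc rest ih => cases kc; simp only [annGo, List.map_cons, List.sum_cons] at ih ⊢; omega

theorem sumSorted (t : TrieL) :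
    ((sortedEntries t).map (fun kv => sizeT kv.2)).sum = sizeL t := by
  rw [← sum_toList_sizes t]
  exact ((PySem.List.sorted_perm t.toList (fun kv => kv.1) false).map _).sum_eq

def loopB : List (String × String × Trie × Bool) → List String → List String
  | [], lines => lines
  | (pre, k, c, last) :: rest, lines =>
    let lines' := lines ++ [pre ++ (if last then "`-- " else "|-- ") ++ k]
    if isEmptyT c then loopB rest lines'
    else loopB
      (annGo (pre ++ (if last then "    " else "|   ")) (sortedEntries c.entries) ++ rest)
      lines'
termination_by items _ => (items.map (fun it => sizeT it.2.2.1)).sum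
decreasing_by
  · simp only [List.map_cons, List.sum_cons]
    have := sizeT_pos c
    omega
  · cases c with | node l =>
      simp only [List.map_append, List.sum_append, List.map_cons, List.sum_cons,
        Trie.entries, sizeT]
      rw [sumAnn, sumSorted]
      omega

def render_tree_py_alt (paths : List String) : String :=
  if paths.isEmpty then "(no new files planned)"
  else
    PySem.Str.join "\n" (loopB (annGo "" (sortedEntries (buildTrie paths))) ["project/"])

-- ===== PRECONDITION & SPEC =====
-- Pre_ excludes inputs containing a path with no nonempty '/'-separated component
-- (e.g. "" or "//"): there A's `parts[-1]` raises IndexError.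
def Pre_render_tree_py (paths : List String) : Prop :=
  (paths.all (fun p => p.toList.any (fun c => !(c == '/')))) = true
instance (paths : List String) : Decidable (Pre_render_tree_py paths) := by
  unfold Pre_render_tree_py; infer_instance

def pvWitness_render_tree_py : List String :=
  ["src/main.py", "src/util/helpers.py", "README.md"]

def Spec_render_tree_py (paths : List String) (out : String) : Prop := out = render_tree_py_alt paths
instance (paths : List String) (out : String) : Decidable (Spec_render_tree_py paths out) := by unfold Spec_render_tree_py; infer_instance

-- ===== CLAIM (what is proved, stated in full; the proofs are below) =====
def Claim_equal_render_tree_py : Prop := ∀ (paths : List String), Dom_render_tree_py paths → Pre_render_tree_py paths → Spec_render_tree_py paths (render_tree_py paths)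

-- ===== LEMMAS AND PROOFS =====

-- recursive mirror of B's per-node expansion, used to state what loopB produces
mutual
def walkB (t : TrieL) (pre : String) : List String :=
  goB (sortedEntries t) pre
  termination_by (sizeL t, 1)
  decreasing_by
    rw [sumSorted]
    exact Prod.Lex.right _ (by omega)
def goB : List (String × Trie) → String → List String
  | [], _ => []
  | (k, c) :: rest, pre =>
    (pre ++ (if rest.isEmpty then "`-- " else "|-- ") ++ k) ::
      ((if isEmptyT c then [] else
          walkB c.entries (pre ++ (if rest.isEmpty then "    " else "|   "))) ++ goB rest pre)
  termination_by es _ => ((es.map (fun kv => sizeT kv.2)).sum, 0)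
  decreasing_by
  · refine Prod.Lex.left _ _ ?_
    have := sizeT_pos c
    cases c with | node l => simp [Trie.entries, sizeT]; omega
  · refine Prod.Lex.left _ _ ?_
    have := sizeT_pos c
    simp; omega
end

def flatItem : String × String × Trie × Bool → List String
  | (pre, k, c, last) =>
    (pre ++ (if last then "`-- " else "|-- ") ++ k) ::
      (if isEmptyT c then [] else
        walkB c.entries (pre ++ (if last then "    " else "|   ")))

theorem flatMap_annGo (pre : String) (es : List (String × Trie)) :
    (annGo pre es).flatMap flatItem = goB es pre := by
  induction es with
  | nil => simp [annGo, goB]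
  | cons kc rest ih =>
    obtain ⟨k, c⟩ := kc
    rw [goB]
    simp [annGo, flatItem, ih]

theorem loopB_eq (items : List (String × String × Trie × Bool)) (lines : List String) :
    loopB items lines = lines ++ items.flatMap flatItem := by
  induction items, lines using loopB.induct with
  | case1 lines => simp [loopB]
  | case2 pre k c last rest lines lines' hEmpty ih =>
    rw [loopB, if_pos hEmpty]
    refine ih.trans ?_
    simp [lines', flatItem, hEmpty]
  | case3 pre k c last rest lines lines' hEmpty ih =>
    rw [loopB, if_neg hEmpty]
    refine ih.trans ?_
    simp [lines', flatItem, hEmpty, flatMap_annGo, walkB]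

-- hereditary well-formedness: no duplicate keys at any node (an invariant of Python
-- dicts that the list encoding does not enforce; buildTrie maintains it)
mutual
def wfT : Trie → Bool
  | .node l => wfL l
def wfL : TrieL → Bool
  | .nil => true
  | .cons k c r => !((keysOf r).contains k) && wfT c && wfL r
end

theorem keysOf_eq : ∀ (t : TrieL), keysOf t = t.toList.map Prod.fst
  | .nil => rfl
  | .cons k c r => by simp [keysOf, TrieL.toList, keysOf_eq r]

theorem wfL_cons_iff (k : String) (c : Trie) (r : TrieL) :
    wfL (.cons k c r) = true ↔ k ∉ keysOf r ∧ wfT c = true ∧ wfL r = true := by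
  rw [wfL]
  simp [and_assoc]

theorem wf_nodup : ∀ (t : TrieL), wfL t = true → (keysOf t).Nodup
  | .nil, _ => by simp [keysOf]
  | .cons k c r, h => by
    rw [wfL_cons_iff] at h
    simp [keysOf, List.nodup_cons, wf_nodup r h.2.2, h.1]

theorem wf_child : ∀ (t : TrieL) (k : String) (c : Trie), wfL t = true →
    (k, c) ∈ t.toList → wfT c = true
  | .cons k' c' r, k, c, h, hm => by
    rw [wfL_cons_iff] at h
    rcases (by simpa [TrieL.toList] using hm : (k = k' ∧ c = c') ∨ (k, c) ∈ r.toList) with h1 | h2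
    · rw [h1.2]; exact h.2.1
    · exact wf_child r k c h.2.2 h2

theorem sizeT_le_of_mem : ∀ (t : TrieL) (k : String) (c : Trie),
    (k, c) ∈ t.toList → sizeT c ≤ sizeL t
  | .cons k' c' r, k, c, hm => by
    rcases (by simpa [TrieL.toList] using hm : (k = k' ∧ c = c') ∨ (k, c) ∈ r.toList) with h1 | h2
    · rw [h1.2]; simp [sizeL]
    · have := sizeT_le_of_mem r k c h2
      have := sizeT_pos c'
      simp [sizeL]; omega

theorem getT_of_mem : ∀ (t : TrieL) (k : String) (c : Trie), (keysOf t).Nodup →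
    (k, c) ∈ t.toList → getT t k = c
  | .cons k' c' r, k, c, hnd, hm => by
    simp only [keysOf, List.nodup_cons] at hnd
    rcases (by simpa [TrieL.toList] using hm : (k = k' ∧ c = c') ∨ (k, c) ∈ r.toList) with h1 | h2
    · simp [getT, h1.1, h1.2]
    · have hne : k' ≠ k := by
        intro he
        exact hnd.1 (he ▸ by rw [keysOf_eq]; exact List.mem_map_of_mem h2)
      rw [getT, if_neg (by simpa using hne)]
      exact getT_of_mem r k c hnd.2 h2

-- sorted(node.keys()) is the list of first components of sorted(node.items(), key=fst)
theorem insertBy_map_fst (x : String × Trie) (ys : List (String × Trie)) :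
    PySem.List.insertBy (fun a b => decide (a < b)) x.1 (ys.map Prod.fst) =
      (PySem.List.insertBy (fun a b => decide (a.1 < b.1)) x ys).map Prod.fst := by
  induction ys with
  | nil => simp [PySem.List.insertBy]
  | cons y ys ih =>
    simp only [List.map_cons, PySem.List.insertBy]
    by_cases h : x.1 < y.1
    · rw [if_pos (by simpa using h), if_pos (by simpa using h)]; rfl
    · rw [if_neg (by simpa using h), if_neg (by simpa using h), List.map_cons, ih]

theorem foldl_insertBy_map_fst (xs acc : List (String × Trie)) :
    (xs.map Prod.fst).foldl
        (fun a x => PySem.List.insertBy (fun a b => decide (a < b)) x a) (acc.map Prod.fst) =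
      (xs.foldl (fun a x => PySem.List.insertBy (fun a b => decide (a.1 < b.1)) x a)
          acc).map Prod.fst := by
  induction xs generalizing acc with
  | nil => simp
  | cons x xs ih =>
    simp only [List.map_cons, List.foldl_cons]
    rw [insertBy_map_fst, ih]

theorem sorted_keys_eq (t : TrieL) :
    PySem.List.sorted (keysOf t) (fun k => k) false = (sortedEntries t).map Prod.fst := by
  rw [keysOf_eq, sortedEntries, PySem.List.sorted_eq_foldl_insertBy,
    PySem.List.sorted_eq_foldl_insertBy]
  exact foldl_insertBy_map_fst t.toList []

-- inserting a path preserves well-formedness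
theorem mem_keysOf_setItem : ∀ (t : TrieL) (k x : String),
    x ∈ keysOf (setItem t k) ↔ x ∈ keysOf t ∨ x = k
  | .nil, k, x => by simp [setItem, keysOf]
  | .cons k' c r, k, x => by
    rw [setItem]
    by_cases h : (k' == k) = true
    · have : k' = k := by simpa using h
      subst this
      simp only [if_pos h, keysOf]
      simp
      tauto
    · rw [if_neg h]
      simp [keysOf, mem_keysOf_setItem r k x]
      tauto

theorem wf_setItem : ∀ (t : TrieL) (k : String), wfL t = true → wfL (setItem t k) = true
  | .nil, k, _ => by
    rw [setItem, wfL_cons_iff]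
    simp [keysOf, wfT, wfL]
  | .cons k' c r, k, h => by
    rw [wfL_cons_iff] at h
    rw [setItem]
    by_cases hk : (k' == k) = true
    · rw [if_pos hk, wfL_cons_iff]
      exact ⟨h.1, by simp [wfT, wfL], h.2.2⟩
    · rw [if_neg hk, wfL_cons_iff]
      refine ⟨?_, h.2.1, wf_setItem r k h.2.2⟩
      rw [mem_keysOf_setItem]
      push Not
      exact ⟨h.1, by simpa using hk⟩

theorem mem_keysOf_insertGo : ∀ (t : TrieL) (k : String) (rest : List String) (x : String),
    x ∈ keysOf (insertGo t k rest) ↔ x ∈ keysOf t ∨ x = k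
  | .nil, k, rest, x => by
    rw [insertGo]
    simp [keysOf]
  | .cons k' c r, k, rest, x => by
    rw [insertGo]
    by_cases h : (k' == k) = true
    · have : k' = k := by simpa using h
      subst this
      rw [if_pos h]
      simp [keysOf]
      tauto
    · rw [if_neg h]
      simp [keysOf, mem_keysOf_insertGo r k rest x]
      tauto

theorem wf_insertGo_of (rest : List String)
    (hp : ∀ u, wfL u = true → wfL (insertPath u rest) = true) :
    ∀ (t : TrieL) (k : String), wfL t = true → wfL (insertGo t k rest) = true
  | .nil, k, _ => by
    rw [insertGo, wfL_cons_iff]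
    exact ⟨by simp [keysOf], by rw [wfT]; exact hp .nil rfl, rfl⟩
  | .cons k' c r, k, h => by
    rw [wfL_cons_iff] at h
    rw [insertGo]
    by_cases hk : (k' == k) = true
    · rw [if_pos hk, wfL_cons_iff]
      obtain ⟨l⟩ := c
      exact ⟨h.1, by rw [wfT]; exact hp l (by rw [wfT] at h; exact h.2.1), h.2.2⟩
    · rw [if_neg hk, wfL_cons_iff]
      refine ⟨?_, h.2.1, wf_insertGo_of rest hp r k h.2.2⟩
      rw [mem_keysOf_insertGo]
      push Not
      exact ⟨h.1, by simpa using hk⟩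

theorem wf_insertPath : ∀ (n : Nat) (parts : List String), parts.length ≤ n →
    ∀ (t : TrieL), wfL t = true → wfL (insertPath t parts) = true := by
  intro n
  induction n with
  | zero =>
    intro parts hlen t ht
    have : parts = [] := by cases parts <;> simp_all
    subst this
    rw [insertPath]
    exact ht
  | succ n ih =>
    intro parts hlen t ht
    match parts with
    | [] => rw [insertPath]; exact ht
    | [k] => rw [insertPath]; exact wf_setItem t k ht
    | k :: k2 :: rest =>
      simp only [insertPath]
      exact wf_insertGo_of (k2 :: rest)
        (fun u hu => ih (k2 :: rest) (by simpa using hlen) u hu) t k ht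

theorem wf_buildTrie (paths : List String) : wfL (buildTrie paths) = true := by
  rw [buildTrie]
  have h : ∀ (ps : List String) (acc : TrieL), wfL acc = true →
      wfL (ps.foldl (fun t p => insertPath t (partsOf p)) acc) = true := by
    intro ps
    induction ps with
    | nil => intro acc h; simpa using h
    | cons p ps ih =>
      intro acc h
      simp only [List.foldl_cons]
      exact ih _ (wf_insertPath (partsOf p).length (partsOf p) le_rfl acc h)
  exact h paths .nil rfl

-- on a well-formed trie, A's recursive walk equals B's per-node expansion
theorem walk_eq : ∀ (n : Nat) (t : TrieL), sizeL t ≤ n → wfL t = true →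
    ∀ (pre : String), walkT t pre = walkB t pre := by
  intro n
  induction n with
  | zero =>
    intro t hsz _ pre
    match t with
    | .nil =>
      rw [walkT, walkB]
      simp only [keysOf, sortedEntries, TrieL.toList, PySem.List.sorted_eq_foldl_insertBy,
        List.foldl_nil]
      simp only [walkKeys, goB]
    | .cons k c r =>
      exfalso
      have := sizeT_pos c
      simp [sizeL] at hsz
      omega
  | succ n ih =>
    intro t hsz hwf pre
    rw [walkT, walkB, sorted_keys_eq t]
    have hmem : ∀ kc ∈ sortedEntries t,
        getT t kc.1 = kc.2 ∧ wfT kc.2 = true ∧ sizeT kc.2 ≤ sizeL t := by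
      intro kc hm
      have hm' : kc ∈ t.toList := (PySem.List.mem_sorted _ _ _ _).1 hm
      obtain ⟨k, c⟩ := kc
      exact ⟨getT_of_mem t k c (wf_nodup t hwf) hm', wf_child t k c hwf hm',
        sizeT_le_of_mem t k c hm'⟩
    generalize sortedEntries t = es at hmem
    induction es with
    | nil => simp only [List.map_nil, walkKeys, goB]
    | cons kc rest ihes =>
      obtain ⟨k, c⟩ := kc
      obtain ⟨hg, hwfc, hszc⟩ := hmem (k, c) (List.mem_cons_self)
      simp only [List.map_cons, walkKeys, goB, List.isEmpty_map, hg]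
      rw [ihes (fun kc hm => hmem kc (List.mem_cons_of_mem _ hm))]
      congr 2
      obtain ⟨l⟩ := c
      by_cases hc : isEmptyT (Trie.node l) = true
      · rw [if_pos hc, if_pos hc]
      · rw [if_neg hc, if_neg hc]
        have hszc' : sizeL l + 1 ≤ sizeL t := by simpa [sizeT] using hszc
        have hwfc' : wfL l = true := by simpa [wfT] using hwfc
        exact ih l (by omega) hwfc' _

theorem ports_agree (paths : List String) :
    render_tree_py paths = render_tree_py_alt paths := by
  rw [render_tree_py, render_tree_py_alt]
  by_cases h : paths.isEmpty
  · simp [h]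
  · rw [if_neg h, if_neg h]
    congr 1
    rw [loopB_eq, flatMap_annGo]
    have hb : goB (sortedEntries (buildTrie paths)) "" = walkB (buildTrie paths) "" := by
      rw [walkB]
    rw [hb, ← walk_eq (sizeL (buildTrie paths)) (buildTrie paths) le_rfl
      (wf_buildTrie paths) ""]
    rfl

-- ===== VERDICT (by name: the statement is the Claim_ definition above) =====
theorem render_tree_py_spec : Claim_equal_render_tree_py := by
  intro paths _ _
  unfold Spec_render_tree_py
  exact ports_agree paths
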